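-- pv_equiv track=rewrite | github.com/alextrouerntrend/bin | coursera/hidden_messages/week_1.py | index_checker
-- ===== SOURCE A (Python) =====
-- def index_checker(window, threshold, kmers, kmer_length):
--     '''
--
--
--     Parameters
--     ----------
--     window : int
--         size of window used to define 'clump' of repeated kmers.
--     threshold : int
--         number of repeated kmers in window to define 'clump'.
--     kmers : dict
--         Output of kmer_index() dictionary of kmers as keys and list of
--         positions in genome as values.
--     kmer_length : int
--         length of kmer.
--
--     Returns
--     -------
--     hitkmers : dict
--         kmers representing clumps. Sequence as key, positions as values.
--         includes all positions across genome.
--     '''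
--     hitkmers = {}
--     for kmer, loc_set in kmers.items():
--         if len(loc_set) >= threshold:
--             set_len = len(loc_set)
--             for i in range(set_len-(threshold-1)):
--                 if loc_set[i+(threshold-1)] - loc_set[i] <= (window-kmer_length):
--                     hitkmers[kmer] = loc_set
--                     break
--     return hitkmers
-- ===== SOURCE B (Python) =====
-- def index_checker(window, threshold, kmers, kmer_length):
--     '''Streaming re-implementation: instead of indexing positions at a fixed
--     offset, slide a buffer of the last `threshold` positions through each list
--     and compare its newest and oldest entries.'''
--     gap = window - kmer_length
--     hitkmers = {}
--     for kmer, locs in kmers.items():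
--         if len(locs) >= threshold:
--             buf = []
--             for x in locs:
--                 buf.append(x)
--                 if len(buf) == threshold:
--                     if x - buf[0] <= gap:
--                         hitkmers[kmer] = locs
--                         break
--                     buf.pop(0)
--     return hitkmers
-- ===== Notes on version B (the rewrite author's own statement) =====
-- stated objective: alternative
-- what changed: Replaces A's random-access scan (index loop comparing loc_set[i+threshold-1]-loc_set[i]) by a streaming pass that slides a buffer of the last `threshold` positions through each list, comparing its newest and oldest entries; hits are collected the same way.
-- outside the precondition, e.g. on index_checker(10, 0, {'A': [1, 2]}, 1): A returns {'A': [1, 2]}, B returns {}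
import Mathlib
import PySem

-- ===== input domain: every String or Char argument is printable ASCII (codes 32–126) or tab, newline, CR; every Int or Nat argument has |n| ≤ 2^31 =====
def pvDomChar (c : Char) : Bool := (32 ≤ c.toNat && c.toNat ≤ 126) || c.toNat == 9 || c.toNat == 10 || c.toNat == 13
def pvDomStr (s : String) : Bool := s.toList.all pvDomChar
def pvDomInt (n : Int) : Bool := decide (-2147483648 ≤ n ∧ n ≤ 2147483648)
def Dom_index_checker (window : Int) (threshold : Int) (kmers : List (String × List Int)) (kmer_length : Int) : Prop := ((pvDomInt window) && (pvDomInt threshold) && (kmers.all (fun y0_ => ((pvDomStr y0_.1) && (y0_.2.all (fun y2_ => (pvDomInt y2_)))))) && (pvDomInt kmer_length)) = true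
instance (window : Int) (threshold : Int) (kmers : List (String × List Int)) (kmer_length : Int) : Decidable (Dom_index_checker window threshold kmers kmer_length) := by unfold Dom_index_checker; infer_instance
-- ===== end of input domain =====

-- B replaces A's fixed-offset index scan by a streaming pass that slides a buffer of the
-- last `threshold` positions through each list (objective: alternative, same cost).


-- ===== PORT A =====
-- A's inner `for i in range(...): if …: insert; break` is the short-circuiting List.any
-- over the same range; loc_set[…] is PySem.List.pyGet? (in range under Pre_).
def index_checker (window : Int) (threshold : Int) (kmers : List (String × List Int)) (kmer_length : Int) : List (String × List Int) :=
  (kmers.foldl (fun hitkmers kv =>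
      let kmer := kv.1
      let loc_set := kv.2
      if threshold ≤ (loc_set.length : Int) then
        let set_len : Int := (loc_set.length : Int)
        if (PySem.List.pyRange 0 (set_len - (threshold - 1)) 1).any (fun i =>
              match PySem.List.pyGet? loc_set (i + (threshold - 1)), PySem.List.pyGet? loc_set i with
              | some a, some b => decide (a - b ≤ window - kmer_length)
              | _, _ => false)
        then PySem.Dict.insert hitkmers kmer loc_set
        else hitkmers
      else hitkmers)
    (PySem.Dict.empty : PySem.Dict String (List Int))).items

-- ===== PORT B =====
-- Source B's inner streaming loop: `buf` holds the trailing window; `buf[0]` is headD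
-- (exact: buf ++ [x] is never empty) and `buf.pop(0)` is drop 1 (buf nonempty there).
def altScan (gap : Int) (threshold : Int) : List Int → List Int → Bool
  | [], _ => false
  | x :: rest, buf =>
    let buf' := buf ++ [x]
    if (buf'.length : Int) = threshold then
      if x - buf'.headD 0 ≤ gap then true
      else altScan gap threshold rest (buf'.drop 1)
    else altScan gap threshold rest buf'

def index_checker_alt (window : Int) (threshold : Int) (kmers : List (String × List Int)) (kmer_length : Int) : List (String × List Int) :=
  (kmers.foldl (fun hitkmers kv =>
      if threshold ≤ (kv.2.length : Int) then
        if altScan (window - kmer_length) threshold kv.2 [] then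
          PySem.Dict.insert hitkmers kv.1 kv.2
        else hitkmers
      else hitkmers)
    (PySem.Dict.empty : PySem.Dict String (List Int))).items

-- ===== PRECONDITION & SPEC =====
-- Pre_ excludes threshold ≤ 0 — negative/zero clump counts, outside the function's
-- natural domain, where A's negative offset makes the indexing raise IndexError on some
-- inputs and wrap around to accidental comparisons on others — and association lists
-- with duplicate keys, which do not represent a Python dict.
def Pre_index_checker (window : Int) (threshold : Int) (kmers : List (String × List Int)) (kmer_length : Int) : Prop :=
  1 ≤ threshold ∧ (kmers.map Prod.fst).Nodup
instance (window : Int) (threshold : Int) (kmers : List (String × List Int)) (kmer_length : Int) : Decidable (Pre_index_checker window threshold kmers kmer_length) := by unfold Pre_index_checker; infer_instance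

def pvWitness_index_checker : Int × Int × (List (String × List Int)) × Int :=
  (4, 2, [("AC", [0, 1, 7]), ("GG", [0, 9])], 2)

def Spec_index_checker (window : Int) (threshold : Int) (kmers : List (String × List Int)) (kmer_length : Int) (out : List (String × List Int)) : Prop := out = index_checker_alt window threshold kmers kmer_length
instance (window : Int) (threshold : Int) (kmers : List (String × List Int)) (kmer_length : Int) (out : List (String × List Int)) : Decidable (Spec_index_checker window threshold kmers kmer_length out) := by unfold Spec_index_checker; infer_instance

-- ===== CLAIM (what is proved, stated in full; the proofs are below) =====
def Claim_equal_index_checker : Prop := ∀ (window : Int) (threshold : Int) (kmers : List (String × List Int)) (kmer_length : Int), Dom_index_checker window threshold kmers kmer_length → Pre_index_checker window threshold kmers kmer_length → Spec_index_checker window threshold kmers kmer_length (index_checker window threshold kmers kmer_length)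

-- ===== LEMMAS AND PROOFS =====

lemma headD_append_cons (buf rest : List Int) (x : Int) :
    (buf ++ [x]).headD 0 = (buf ++ x :: rest).headD 0 := by
  cases buf <;> rfl

lemma tail_append_cons (buf rest : List Int) (x : Int) :
    (buf ++ x :: rest).tail = (buf ++ [x]).drop 1 ++ rest := by
  cases buf <;> simp

-- altScan on the remaining list with a partial buffer checks exactly every pair of the
-- combined list at index offset threshold-1.
lemma altScan_eq (gap t : Int) : ∀ (xs buf : List Int), (buf.length : Int) < t →
    altScan gap t xs buf
      = ((buf ++ xs).zip ((buf ++ xs).drop (t.toNat - 1))).any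
          (fun p => decide (p.2 - p.1 ≤ gap)) := by
  intro xs
  induction xs with
  | nil =>
    intro buf hb
    have : (t.toNat - 1 : Nat) ≥ buf.length := by omega
    simp [altScan, List.drop_eq_nil_of_le this]
  | cons x rest ih =>
    intro buf hb
    have ht1 : 1 ≤ t := by omega
    by_cases h : (((buf ++ [x]).length : Nat) : Int) = t
    · have hbl : buf.length = t.toNat - 1 := by simp at h; omega
      rcases hc : buf ++ x :: rest with _ | ⟨c0, ctail⟩
      · exact absurd hc (by simp)
      have hdrop : List.drop (t.toNat - 1) (c0 :: ctail) = x :: rest := by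
        rw [← hc, ← hbl]; simp
      have hc0 : (buf ++ [x]).headD 0 = c0 := by
        rw [headD_append_cons buf rest x, hc]; rfl
      have hctail : (buf ++ [x]).drop 1 ++ rest = ctail := by
        have h2 := tail_append_cons buf rest x
        rw [hc] at h2
        simpa using h2.symm
      by_cases hcmp : x - (buf ++ [x]).headD 0 ≤ gap
      · simp only [altScan, h, if_pos, hdrop, List.zip_cons_cons,
          List.any_cons, hc0] at *
        simp [hcmp]
      · simp only [altScan, h, hcmp, if_true, if_false]
        rw [ih ((buf ++ [x]).drop 1) (by simp at hb ⊢; omega)]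
        rw [hdrop]
        simp only [List.zip_cons_cons, List.any_cons]
        rw [hc0] at hcmp
        rw [decide_eq_false hcmp]
        simp only [Bool.false_or]
        rw [hctail]
        have hd2 : ctail.drop (t.toNat - 1) = rest := by
          have h2 : (buf ++ x :: rest).drop (t.toNat - 1 + 1) = rest := by
            rw [← List.drop_drop, hc, hdrop]
            simp
          rw [hc] at h2
          simpa using h2
        rw [hd2]
    · simp only [altScan, h]
      rw [ih (buf ++ [x]) (by simp at h hb ⊢; omega)]
      simp

-- A's range-scan equals the zip-scan (both = "some index pair at offset t' qualifies").
lemma range_any_eq_zip_any (gap : Int) (t' : Nat) (loc : List Int) :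
    ((List.range (loc.length - t')).any (fun k =>
        match loc[k + t']?, loc[k]? with
        | some a, some b => decide (a - b ≤ gap)
        | _, _ => false))
      = (loc.zip (loc.drop t')).any (fun p => decide (p.2 - p.1 ≤ gap)) := by
  rw [← Bool.coe_iff_coe]
  simp only [List.any_eq_true, List.mem_range]
  constructor
  · rintro ⟨k, hk, hm⟩
    have h1 : k + t' < loc.length := by omega
    have h0 : k < loc.length := by omega
    rw [List.getElem?_eq_getElem h1, List.getElem?_eq_getElem h0] at hm
    simp only [decide_eq_true_eq] at hm
    refine ⟨(loc[k], loc[k + t']), ?_, by simpa using hm⟩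
    rw [List.mem_iff_getElem]
    refine ⟨k, by simp [List.length_zip]; omega, ?_⟩
    rw [List.getElem_zip]
    have hd : (loc.drop t')[k]'(by simp; omega) = loc[t' + k]'(by omega) := List.getElem_drop ..
    rw [hd]
    have : t' + k = k + t' := by omega
    simp [this]
  · rintro ⟨p, hp, hdec⟩
    rw [List.mem_iff_getElem] at hp
    obtain ⟨k, hk, hpk⟩ := hp
    have hk' : k < loc.length - t' := by
      simp [List.length_zip] at hk; omega
    have h1 : k + t' < loc.length := by omega
    have h0 : k < loc.length := by omega
    refine ⟨k, hk', ?_⟩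
    rw [List.getElem?_eq_getElem h1, List.getElem?_eq_getElem h0]
    rw [List.getElem_zip] at hpk
    have hd : (loc.drop t')[k]'(by simp; omega) = loc[t' + k]'(by omega) := List.getElem_drop ..
    rw [hd] at hpk
    rw [← hpk] at hdec
    simp only [decide_eq_true_eq] at hdec ⊢
    have he : t' + k = k + t' := by omega
    simpa [he] using hdec

-- per-kmer: A's condition equals B's condition
lemma cond_eq (gap t : Int) (ht : 1 ≤ t) (loc : List Int) :
    ((PySem.List.pyRange 0 ((loc.length : Int) - (t - 1)) 1).any (fun i =>
        match PySem.List.pyGet? loc (i + (t - 1)), PySem.List.pyGet? loc i with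
        | some a, some b => decide (a - b ≤ gap)
        | _, _ => false))
      = altScan gap t loc [] := by
  have hb : (([] : List Int).length : Int) < t := by simp; omega
  rw [altScan_eq gap t loc [] hb]
  simp only [List.nil_append]
  rw [← range_any_eq_zip_any gap (t.toNat - 1) loc]
  rw [PySem.List.pyRange_one]
  rw [List.any_map]
  have hn : (((loc.length : Int) - (t - 1)) - 0).toNat = loc.length - (t.toNat - 1) := by omega
  rw [hn]
  apply List.any_congr rfl
  intro k
  simp only [Function.comp]
  have h1 : (0 : Int) + (k : Int) + (t - 1) = ((k + (t.toNat - 1) : Nat) : Int) := by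
    push_cast; omega
  have h2 : (0 : Int) + (k : Int) = ((k : Nat) : Int) := by ring
  rw [h1, h2, PySem.List.pyGet?_natCast, PySem.List.pyGet?_natCast]

-- ===== VERDICT (by name: the statement is the Claim_ definition above) =====
theorem index_checker_spec : Claim_equal_index_checker := by
  intro window threshold kmers kmer_length _hdom hpre
  obtain ⟨ht, _⟩ := hpre
  unfold Spec_index_checker index_checker index_checker_alt
  congr 1
  apply PySem.List.foldl_congr_mem
  intro acc kv _
  simp only []
  by_cases h : threshold ≤ (kv.2.length : Int)
  · rw [if_pos h, if_pos h, cond_eq (window - kmer_length) threshold ht kv.2]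
  · rw [if_neg h, if_neg h]
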